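-- pv_equiv track=rewrite | github.com/samartomar/integration-hub | apps/api/src/schema/canonical_runtime_preflight.py | _checks_for_validation_failure
-- ===== SOURCE A (Python) =====
-- from typing import Any
--
-- def _checks_for_validation_failure(errors: list[dict[str, Any]]) -> list[dict[str, Any]]:
--     """Build minimal checks for validation failure."""
--     checks = []
--     if any("sourceVendor" in (e.get("field") or "") for e in errors):
--         checks.append({
--             "code": "SOURCE_VENDOR_VALID",
--             "status": "FAIL",
--             "message": "sourceVendor is required.",
--         })
--     if any("targetVendor" in (e.get("field") or "") for e in errors):
--         checks.append({
--             "code": "TARGET_VENDOR_VALID",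
--             "status": "FAIL",
--             "message": "targetVendor is required.",
--         })
--     if any("envelope" in (e.get("field") or "") for e in errors):
--         checks.append({
--             "code": "CANONICAL_REQUEST_VALID",
--             "status": "FAIL",
--             "message": "Canonical request envelope is invalid.",
--         })
--     if not checks:
--         checks.append({
--             "code": "REQUEST_VALID",
--             "status": "FAIL",
--             "message": "Request validation failed.",
--         })
--     return checks
-- ===== SOURCE B (Python) =====
-- def _checks_for_validation_failure(errors):
--     """Build minimal checks for validation failure."""
--     table = [
--         ("sourceVendor", "SOURCE_VENDOR_VALID", "sourceVendor is required."),
--         ("targetVendor", "TARGET_VENDOR_VALID", "targetVendor is required."),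
--         ("envelope", "CANONICAL_REQUEST_VALID", "Canonical request envelope is invalid."),
--     ]
--     present = set()
--     for e in errors:
--         field = e.get("field") or ""
--         for kw, _code, _msg in table:
--             if kw in field:
--                 present.add(kw)
--     checks = [
--         {"code": code, "status": "FAIL", "message": msg}
--         for kw, code, msg in table
--         if kw in present
--     ]
--     if not checks:
--         checks = [{
--             "code": "REQUEST_VALID",
--             "status": "FAIL",
--             "message": "Request validation failed.",
--         }]
--     return checks
-- ===== Notes on version B (the rewrite author's own statement) =====
-- stated objective: simpler
-- what changed: Replaces three separate any() scans over errors and inline dict literals by a single pass that collects a presence set of matched keywords plus a data-driven (keyword, code, message) table from which the FAIL checks are generated.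
import Mathlib
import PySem

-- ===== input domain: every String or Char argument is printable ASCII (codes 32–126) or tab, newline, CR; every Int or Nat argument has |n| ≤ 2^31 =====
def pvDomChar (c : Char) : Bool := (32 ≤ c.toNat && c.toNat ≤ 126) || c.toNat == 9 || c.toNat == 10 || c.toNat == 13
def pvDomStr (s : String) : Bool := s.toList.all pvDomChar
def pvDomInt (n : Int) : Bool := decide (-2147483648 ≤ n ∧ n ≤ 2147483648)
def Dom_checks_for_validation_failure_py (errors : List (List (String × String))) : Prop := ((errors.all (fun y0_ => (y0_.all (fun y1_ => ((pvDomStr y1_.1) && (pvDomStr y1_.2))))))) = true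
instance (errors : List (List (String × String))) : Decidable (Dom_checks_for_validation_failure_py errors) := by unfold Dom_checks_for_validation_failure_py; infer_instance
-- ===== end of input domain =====

-- B replaces A's three separate any() scans and inline dict literals by one pass collecting a
-- presence set of matched keywords plus a data-driven (keyword, code, message) table (objective: simpler).

-- ===== PORT A =====
-- literal transliteration: three any(...) scans, each appending one inline dict, then the fallback
def checks_for_validation_failure_py (errors : List (List (String × String))) : List (List (String × String)) :=
  let checks : List (List (String × String)) := []
  let checks := if errors.any (fun e => PySem.Str.isIn "sourceVendor" ((PySem.Dict.get? (PySem.Dict.mk e) "field").getD ""))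
    then checks ++ [[("code", "SOURCE_VENDOR_VALID"), ("status", "FAIL"), ("message", "sourceVendor is required.")]] else checks
  let checks := if errors.any (fun e => PySem.Str.isIn "targetVendor" ((PySem.Dict.get? (PySem.Dict.mk e) "field").getD ""))
    then checks ++ [[("code", "TARGET_VENDOR_VALID"), ("status", "FAIL"), ("message", "targetVendor is required.")]] else checks
  let checks := if errors.any (fun e => PySem.Str.isIn "envelope" ((PySem.Dict.get? (PySem.Dict.mk e) "field").getD ""))
    then checks ++ [[("code", "CANONICAL_REQUEST_VALID"), ("status", "FAIL"), ("message", "Canonical request envelope is invalid.")]] else checks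
  if checks.isEmpty
    then checks ++ [[("code", "REQUEST_VALID"), ("status", "FAIL"), ("message", "Request validation failed.")]] else checks

-- ===== PORT B =====
-- B-side helper: the ordered (keyword, code, message) table
def pvTable : List (String × String × String) :=
  [("sourceVendor", "SOURCE_VENDOR_VALID", "sourceVendor is required."),
   ("targetVendor", "TARGET_VENDOR_VALID", "targetVendor is required."),
   ("envelope", "CANONICAL_REQUEST_VALID", "Canonical request envelope is invalid.")]

-- B-side helper: body of B's single pass — add every table keyword occurring in this error's field
def pvStep (present : PySem.Set String) (e : List (String × String)) : PySem.Set String :=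
  let field := (PySem.Dict.get? (PySem.Dict.mk e) "field").getD ""
  pvTable.foldl (fun present t => if PySem.Str.isIn t.1 field then PySem.Set.add present t.1 else present) present

def checks_for_validation_failure_py_alt (errors : List (List (String × String))) : List (List (String × String)) :=
  let present : PySem.Set String := errors.foldl pvStep PySem.Set.empty
  let checks := (pvTable.filter (fun t => PySem.Set.contains present t.1)).map
      (fun t => [("code", t.2.1), ("status", "FAIL"), ("message", t.2.2)])
  if checks.isEmpty
    then [[("code", "REQUEST_VALID"), ("status", "FAIL"), ("message", "Request validation failed.")]] else checks

-- ===== PRECONDITION & SPEC =====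
def Spec_checks_for_validation_failure_py (errors : List (List (String × String))) (out : List (List (String × String))) : Prop := out = checks_for_validation_failure_py_alt errors
instance (errors : List (List (String × String))) (out : List (List (String × String))) : Decidable (Spec_checks_for_validation_failure_py errors out) := by unfold Spec_checks_for_validation_failure_py; infer_instance

-- ===== CLAIM (what is proved, stated in full; the proofs are below) =====
def Claim_equal_checks_for_validation_failure_py : Prop := ∀ (errors : List (List (String × String))), Dom_checks_for_validation_failure_py errors → Spec_checks_for_validation_failure_py errors (checks_for_validation_failure_py errors)

-- ===== LEMMAS AND PROOFS =====

-- one step of B's pass adds a table keyword exactly when it occurs in this error's field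
lemma mem_pvStep (s : PySem.Set String) (e : List (String × String)) (kw : String)
    (hkw : kw = "sourceVendor" ∨ kw = "targetVendor" ∨ kw = "envelope") :
    kw ∈ pvStep s e ↔
      (kw ∈ s ∨ PySem.Str.isIn kw ((PySem.Dict.get? (PySem.Dict.mk e) "field").getD "") = true) := by
  unfold pvStep
  simp only [pvTable, List.foldl_cons, List.foldl_nil]
  rcases hkw with h | h | h <;> subst h <;>
    split_ifs with h1 h2 h3 <;>
    simp_all only [PySem.Set.mem_add] <;>
    simp_all [String.ext_iff]

-- B's presence set after the whole pass answers exactly A's any() question for each table keyword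
lemma mem_foldl_pvStep (errors : List (List (String × String))) (s : PySem.Set String) (kw : String)
    (hkw : kw = "sourceVendor" ∨ kw = "targetVendor" ∨ kw = "envelope") :
    kw ∈ errors.foldl pvStep s ↔
      (kw ∈ s ∨ errors.any (fun e => PySem.Str.isIn kw ((PySem.Dict.get? (PySem.Dict.mk e) "field").getD "")) = true) := by
  induction errors generalizing s with
  | nil => simp
  | cons e rest ih =>
    rw [List.foldl_cons, ih (pvStep s e), mem_pvStep s e kw hkw, List.any_cons]
    simp only [Bool.or_eq_true]
    tauto

-- the presence-set membership stated as the Bool contains that B's filter tests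
lemma contains_foldl_pvStep (errors : List (List (String × String))) (kw : String)
    (hkw : kw = "sourceVendor" ∨ kw = "targetVendor" ∨ kw = "envelope") :
    PySem.Set.contains (errors.foldl pvStep PySem.Set.empty) kw
      = errors.any (fun e => PySem.Str.isIn kw ((PySem.Dict.get? (PySem.Dict.mk e) "field").getD "")) := by
  have h := mem_foldl_pvStep errors PySem.Set.empty kw hkw
  simp only [PySem.Set.empty, List.not_mem_nil, false_or] at h
  rcases Bool.eq_false_or_eq_true (errors.any (fun e => PySem.Str.isIn kw ((PySem.Dict.get? (PySem.Dict.mk e) "field").getD ""))) with hb | hb <;> rw [hb]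
  · exact (PySem.Set.contains_iff _ _).mpr (h.mpr hb)
  · rw [Bool.eq_false_iff]
    intro hval
    rw [PySem.Set.contains_iff] at hval
    exact absurd (h.mp hval) (by rw [hb]; exact Bool.false_ne_true)

-- ===== VERDICT (by name: the statement is the Claim_ definition above) =====
theorem checks_for_validation_failure_py_spec : Claim_equal_checks_for_validation_failure_py := by
  intro errors _
  unfold Spec_checks_for_validation_failure_py checks_for_validation_failure_py checks_for_validation_failure_py_alt
  have hc1 := contains_foldl_pvStep errors "sourceVendor" (Or.inl rfl)
  have hc2 := contains_foldl_pvStep errors "targetVendor" (Or.inr (Or.inl rfl))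
  have hc3 := contains_foldl_pvStep errors "envelope" (Or.inr (Or.inr rfl))
  simp only [pvTable, List.filter_cons, List.filter_nil, hc1, hc2, hc3]
  rcases Bool.eq_false_or_eq_true (errors.any (fun e => PySem.Str.isIn "sourceVendor" ((PySem.Dict.get? (PySem.Dict.mk e) "field").getD ""))) with hb1 | hb1 <;>
  rcases Bool.eq_false_or_eq_true (errors.any (fun e => PySem.Str.isIn "targetVendor" ((PySem.Dict.get? (PySem.Dict.mk e) "field").getD ""))) with hb2 | hb2 <;>
  rcases Bool.eq_false_or_eq_true (errors.any (fun e => PySem.Str.isIn "envelope" ((PySem.Dict.get? (PySem.Dict.mk e) "field").getD ""))) with hb3 | hb3 <;>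
    simp only [hb1, hb2, hb3] <;> rfl
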